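-- pv_equiv track=rewrite | github.com/1oss1ess/HackBulgaria-Programming101-Python-2018 | week-2/01.PythonFinalRound/python_final_round.py | birthday_ranges
-- ===== SOURCE A (Python) =====
-- def birthday_ranges(birthdays, ranges):
--     result = []
--     for day in ranges:
--         if day[0] in range(1, 365 + 1) and day[1] in range(1, 365 + 1):
--             count = 0
--             for birthday in birthdays:
--                 if birthday in range(1, 365 + 1) and birthday in range(day[0], day[1] + 1):
--                     count += 1
--             result.append(count)
--
--     return result
-- ===== SOURCE B (Python) =====
-- def birthday_ranges(birthdays, ranges):
--     # Histogram over days 1..365 + prefix sums: each query answered in O(1).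
--     hist = [0] * 367
--     for b in birthdays:
--         if 1 <= b <= 365:
--             hist[b] += 1
--     pre = [0] * 366
--     for d in range(1, 366):
--         pre[d] = pre[d - 1] + hist[d]
--     result = []
--     for lo, hi in ranges:
--         if 1 <= lo <= 365 and 1 <= hi <= 365:
--             result.append(pre[hi] - pre[lo - 1] if lo <= hi else 0)
--     return result
-- ===== Notes on version B (the rewrite author's own statement) =====
-- stated objective: faster
-- what changed: Replaces the per-range scan over all birthdays with a day histogram plus prefix sums, answering each range query in O(1).
import Mathlib
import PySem

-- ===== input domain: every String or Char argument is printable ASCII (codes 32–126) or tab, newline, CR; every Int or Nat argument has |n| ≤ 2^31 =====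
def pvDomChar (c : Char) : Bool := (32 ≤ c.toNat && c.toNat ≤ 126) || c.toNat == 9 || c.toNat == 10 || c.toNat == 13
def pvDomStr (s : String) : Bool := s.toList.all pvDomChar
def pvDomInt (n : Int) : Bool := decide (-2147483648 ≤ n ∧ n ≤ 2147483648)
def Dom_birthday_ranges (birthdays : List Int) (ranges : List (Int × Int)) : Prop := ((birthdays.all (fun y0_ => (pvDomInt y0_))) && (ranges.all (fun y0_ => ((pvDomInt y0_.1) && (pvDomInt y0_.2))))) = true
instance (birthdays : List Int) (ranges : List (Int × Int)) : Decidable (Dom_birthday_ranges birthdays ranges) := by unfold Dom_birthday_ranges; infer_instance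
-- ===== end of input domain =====

-- B replaces A's per-range scan over all birthdays by a day histogram + prefix sums (objective: faster).

-- ===== PORT A =====
def birthday_ranges (birthdays : List Int) (ranges : List (Int × Int)) : List Int :=
  ranges.foldl (fun result day =>
    if (1 ≤ day.1 ∧ day.1 ≤ 365) ∧ (1 ≤ day.2 ∧ day.2 ≤ 365) then
      result ++ [birthdays.foldl (fun count b =>
        if (1 ≤ b ∧ b ≤ 365) ∧ (day.1 ≤ b ∧ b ≤ day.2) then count + 1 else count) 0]
    else result) []

-- ===== PORT B =====
-- hist = [0]*367; for b in birthdays: if 1 <= b <= 365: hist[b] += 1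
def pvHist (birthdays : List Int) : List Int :=
  birthdays.foldl (fun h b =>
    if 1 ≤ b ∧ b ≤ 365 then h.set b.toNat (h.getD b.toNat 0 + 1) else h)
    (List.replicate 367 0)

-- pre = [0]*366; for d in range(1, 366): pre[d] = pre[d-1] + hist[d]
def pvPre (hist : List Int) : List Int :=
  (List.range' 1 365).foldl (fun p d => p.set d (p.getD (d - 1) 0 + hist.getD d 0))
    (List.replicate 366 0)

def birthday_ranges_alt (birthdays : List Int) (ranges : List (Int × Int)) : List Int :=
  let pre := pvPre (pvHist birthdays)
  ranges.foldl (fun result day =>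
    if (1 ≤ day.1 ∧ day.1 ≤ 365) ∧ (1 ≤ day.2 ∧ day.2 ≤ 365) then
      result ++ [if day.1 ≤ day.2 then pre.getD day.2.toNat 0 - pre.getD (day.1.toNat - 1) 0 else 0]
    else result) []

-- ===== PRECONDITION & SPEC =====
def Spec_birthday_ranges (birthdays : List Int) (ranges : List (Int × Int)) (out : List Int) : Prop := out = birthday_ranges_alt birthdays ranges
instance (birthdays : List Int) (ranges : List (Int × Int)) (out : List Int) : Decidable (Spec_birthday_ranges birthdays ranges out) := by unfold Spec_birthday_ranges; infer_instance

-- ===== CLAIM (what is proved, stated in full; the proofs are below) =====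
def Claim_equal_birthday_ranges : Prop := ∀ (birthdays : List Int) (ranges : List (Int × Int)), Dom_birthday_ranges birthdays ranges → Spec_birthday_ranges birthdays ranges (birthday_ranges birthdays ranges)

-- ===== LEMMAS AND PROOFS =====

-- Int-valued count of elements satisfying a Bool predicate (proof-side spec).
def cntI (p : Int → Bool) : List Int → Int
  | [] => 0
  | b :: l => (if p b then 1 else 0) + cntI p l

-- prefix-sum spec: Ssum hist d = hist[1] + … + hist[d]
def Ssum (hist : List Int) : Nat → Int
  | 0 => 0
  | d + 1 => Ssum hist d + hist.getD (d + 1) 0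

theorem cntI_false (p : Int → Bool) (h : ∀ b, p b = false) : ∀ l, cntI p l = 0 := by
  intro l; induction l with
  | nil => rfl
  | cons b l ih => simp [cntI, h b, ih]

theorem cntI_split (p q r : Int → Bool)
    (h : ∀ b, (if p b then (1 : Int) else 0) = (if q b then 1 else 0) + (if r b then 1 else 0)) :
    ∀ l, cntI p l = cntI q l + cntI r l := by
  intro l; induction l with
  | nil => simp [cntI]
  | cons b l ih => simp only [cntI, ih]; have := h b; omega

theorem getD_replicate_zero (n i : Nat) : (List.replicate n (0 : Int)).getD i 0 = 0 := by
  simp [List.getD_eq_getElem?_getD, List.getElem?_replicate]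
  split <;> rfl

theorem getD_set_self (l : List Int) (i : Nat) (v : Int) (hi : i < l.length) :
    (l.set i v).getD i 0 = v := by
  simp [List.getD_eq_getElem?_getD, hi]

theorem getD_set_ne (l : List Int) (i j : Nat) (v : Int) (hij : i ≠ j) :
    (l.set i v).getD j 0 = l.getD j 0 := by
  simp [List.getD_eq_getElem?_getD, List.getElem?_set_ne hij]

-- A's inner loop counts the predicate.
theorem foldl_count (lo hi : Int) : ∀ (l : List Int) (c : Int),
    l.foldl (fun count b =>
      if (1 ≤ b ∧ b ≤ 365) ∧ (lo ≤ b ∧ b ≤ hi) then count + 1 else count) c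
    = c + cntI (fun b => decide ((1 ≤ b ∧ b ≤ 365) ∧ (lo ≤ b ∧ b ≤ hi))) l := by
  intro l; induction l with
  | nil => intro c; simp [cntI]
  | cons b l ih =>
    intro c
    simp only [List.foldl_cons, cntI, ih, decide_eq_true_eq]
    split <;> ring

-- histogram fold invariant
theorem hist_invariant : ∀ (l : List Int) (h : List Int), h.length = 367 →
    (l.foldl (fun h b =>
      if 1 ≤ b ∧ b ≤ 365 then h.set b.toNat (h.getD b.toNat 0 + 1) else h) h).length = 367 ∧
    ∀ d : Nat, 1 ≤ d → d ≤ 365 →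
      (l.foldl (fun h b =>
        if 1 ≤ b ∧ b ≤ 365 then h.set b.toNat (h.getD b.toNat 0 + 1) else h) h).getD d 0
      = h.getD d 0 + cntI (fun b => decide (b = (d : Int))) l := by
  intro l; induction l with
  | nil => intro h hlen; exact ⟨hlen, by intro d _ _; simp [cntI]⟩
  | cons b l ih =>
    intro h hlen
    by_cases hb : 1 ≤ b ∧ b ≤ 365
    · have hlen' : (h.set b.toNat (h.getD b.toNat 0 + 1)).length = 367 := by
        rw [List.length_set]; exact hlen
      obtain ⟨hL, hD⟩ := ih (h.set b.toNat (h.getD b.toNat 0 + 1)) hlen'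
      refine ⟨by simpa [List.foldl_cons, hb] using hL, ?_⟩
      intro d hd1 hd2
      simp only [List.foldl_cons, if_pos hb]
      rw [hD d hd1 hd2]
      by_cases hbd : b.toNat = d
      · subst hbd
        have hbd' : b = ((b.toNat : Nat) : Int) := by omega
        rw [getD_set_self _ _ _ (by rw [hlen]; omega)]
        simp [cntI, ← hbd']
        try omega
      · have hbd' : ¬ (b = (d : Int)) := by omega
        rw [getD_set_ne _ _ _ _ hbd]
        simp [cntI, hbd']
    · obtain ⟨hL, hD⟩ := ih h hlen
      refine ⟨by simpa [List.foldl_cons, hb] using hL, ?_⟩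
      intro d hd1 hd2
      have hbd : ¬ (b = (d : Int)) := by omega
      simp only [List.foldl_cons, if_neg hb]
      rw [hD d hd1 hd2]
      simp [cntI, hbd]

-- prefix-sum fold invariant
theorem pre_invariant : ∀ (m : Nat), m ≤ 365 → ∀ (hist : List Int),
    ((List.range' 1 m).foldl (fun p d => p.set d (p.getD (d - 1) 0 + hist.getD d 0))
      (List.replicate 366 0)).length = 366 ∧
    ∀ d : Nat, d ≤ m →
      ((List.range' 1 m).foldl (fun p d => p.set d (p.getD (d - 1) 0 + hist.getD d 0))
        (List.replicate 366 0)).getD d 0 = Ssum hist d := by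
  intro m; induction m with
  | zero =>
    intro _ hist
    constructor
    · show (List.replicate 366 (0 : Int)).length = 366
      rw [List.length_replicate]
    · intro d hd
      have hd0 : d = 0 := by omega
      subst hd0
      show (List.replicate 366 (0 : Int)).getD 0 0 = Ssum hist 0
      rw [getD_replicate_zero]; rfl
  | succ m ih =>
    intro hm hist
    obtain ⟨hL, hD⟩ := ih (by omega) hist
    have hcat : List.range' 1 (m + 1) = List.range' 1 m ++ [m + 1] := by
      have := List.range'_concat (s := 1) (n := m) (step := 1)
      simpa [Nat.add_comm] using this
    rw [hcat, List.foldl_append, List.foldl_cons, List.foldl_nil]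
    simp only [Nat.add_sub_cancel]
    refine ⟨by rw [List.length_set]; exact hL, ?_⟩
    intro d hd
    by_cases hdm : d = m + 1
    · subst hdm
      rw [hD m (by omega), getD_set_self _ _ _ (by rw [hL]; omega)]
      rfl
    · rw [getD_set_ne _ _ _ _ (by omega)]
      exact hD d (by omega)

-- the prefix sums of the histogram count 1 ≤ b ≤ d
theorem Ssum_hist (birthdays : List Int) : ∀ d : Nat, d ≤ 365 →
    Ssum (pvHist birthdays) d = cntI (fun b => decide (1 ≤ b ∧ b ≤ (d : Int))) birthdays := by
  intro d; induction d with
  | zero =>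
    intro _
    rw [cntI_false _ (by intro b; simp only [decide_eq_false_iff_not]; omega)]
    rfl
  | succ d ih =>
    intro hd
    obtain ⟨_, hD⟩ := hist_invariant birthdays (List.replicate 367 0) (by rw [List.length_replicate])
    have hh : (pvHist birthdays).getD (d + 1) 0
        = cntI (fun b => decide (b = ((d + 1 : Nat) : Int))) birthdays := by
      unfold pvHist
      rw [hD (d + 1) (by omega) (by omega), getD_replicate_zero]
      ring
    have hsplit := cntI_split
      (fun b => decide (1 ≤ b ∧ b ≤ ((d + 1 : Nat) : Int)))
      (fun b => decide (1 ≤ b ∧ b ≤ (d : Int)))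
      (fun b => decide (b = ((d + 1 : Nat) : Int)))
      (by intro b; simp only [decide_eq_true_eq]; split_ifs <;> omega) birthdays
    show Ssum (pvHist birthdays) d + (pvHist birthdays).getD (d + 1) 0 = _
    rw [ih (by omega), hh, ← hsplit]

-- per-query equality
theorem query_eq (birthdays : List Int) (lo hi : Int)
    (hlo : 1 ≤ lo ∧ lo ≤ 365) (hhi : 1 ≤ hi ∧ hi ≤ 365) :
    (if lo ≤ hi then
      (pvPre (pvHist birthdays)).getD hi.toNat 0 - (pvPre (pvHist birthdays)).getD (lo.toNat - 1) 0
     else 0)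
    = cntI (fun b => decide ((1 ≤ b ∧ b ≤ 365) ∧ (lo ≤ b ∧ b ≤ hi))) birthdays := by
  obtain ⟨_, hD⟩ := pre_invariant 365 (le_refl _) (pvHist birthdays)
  by_cases hle : lo ≤ hi
  · rw [if_pos hle]
    unfold pvPre
    rw [hD hi.toNat (by omega), hD (lo.toNat - 1) (by omega),
        Ssum_hist birthdays hi.toNat (by omega), Ssum_hist birthdays (lo.toNat - 1) (by omega)]
    have := cntI_split
      (fun b => decide (1 ≤ b ∧ b ≤ ((hi.toNat : Nat) : Int)))
      (fun b => decide (1 ≤ b ∧ b ≤ ((lo.toNat - 1 : Nat) : Int)))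
      (fun b => decide ((1 ≤ b ∧ b ≤ 365) ∧ (lo ≤ b ∧ b ≤ hi)))
      (by intro b; simp only [decide_eq_true_eq]; split_ifs <;> omega) birthdays
    omega
  · rw [if_neg hle]
    rw [cntI_false _ (by intro b; simp only [decide_eq_false_iff_not]; omega)]

-- outer fold congruence
theorem outer_fold (birthdays : List Int) : ∀ (ranges : List (Int × Int)) (acc : List Int),
    ranges.foldl (fun result day =>
      if (1 ≤ day.1 ∧ day.1 ≤ 365) ∧ (1 ≤ day.2 ∧ day.2 ≤ 365) then
        result ++ [birthdays.foldl (fun count b =>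
          if (1 ≤ b ∧ b ≤ 365) ∧ (day.1 ≤ b ∧ b ≤ day.2) then count + 1 else count) 0]
      else result) acc
    = ranges.foldl (fun result day =>
      if (1 ≤ day.1 ∧ day.1 ≤ 365) ∧ (1 ≤ day.2 ∧ day.2 ≤ 365) then
        result ++ [if day.1 ≤ day.2 then
            (pvPre (pvHist birthdays)).getD day.2.toNat 0
              - (pvPre (pvHist birthdays)).getD (day.1.toNat - 1) 0
          else 0]
      else result) acc := by
  intro ranges; induction ranges with
  | nil => intro acc; rfl
  | cons day rest ih =>
    intro acc
    simp only [List.foldl_cons]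
    by_cases hday : (1 ≤ day.1 ∧ day.1 ≤ 365) ∧ (1 ≤ day.2 ∧ day.2 ≤ 365)
    · rw [if_pos hday, if_pos hday, foldl_count day.1 day.2 birthdays 0,
          query_eq birthdays day.1 day.2 hday.1 hday.2, zero_add, ih]
    · rw [if_neg hday, if_neg hday, ih]

-- ===== VERDICT (by name: the statement is the Claim_ definition above) =====
theorem birthday_ranges_spec : Claim_equal_birthday_ranges := by
  intro birthdays ranges _
  unfold Spec_birthday_ranges birthday_ranges birthday_ranges_alt
  exact outer_fold birthdays ranges []
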